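-- pv_equiv track=rewrite | github.com/rivetsql/rivetsql | rivet/src/rivet_core/interactive/catalog_search.py | _fuzzy_match
-- ===== SOURCE A (Python) =====
-- def _fuzzy_match(query: str, text: str) -> list[int] | None:
--     """Subsequence fuzzy match. Returns match positions or None if no match."""
--     q = query.lower()
--     t = text.lower()
--     positions: list[int] = []
--     qi = 0
--     for ti, ch in enumerate(t):
--         if qi < len(q) and ch == q[qi]:
--             positions.append(ti)
--             qi += 1
--     if qi == len(q):
--         return positions
--     return None
-- ===== SOURCE B (Python) =====
-- def _fuzzy_match(query: str, text: str) -> list[int] | None: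
--     """Subsequence fuzzy match. Returns match positions or None if no match."""
--     q = query.lower()
--     t = text.lower()
--     positions: list[int] = []
--     pos = 0
--     for ch in q:
--         idx = t.find(ch, pos)
--         if idx == -1:
--             return None
--         positions.append(idx)
--         pos = idx + 1
--     return positions
-- ===== Notes on version B (the rewrite author's own statement) =====
-- stated objective: idiomatic
-- what changed: Instead of scanning every text character with a query pointer, B iterates the query characters and jumps the cursor with str.find(ch, pos), so non-matching text is skipped by the library search.
import Mathlib
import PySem

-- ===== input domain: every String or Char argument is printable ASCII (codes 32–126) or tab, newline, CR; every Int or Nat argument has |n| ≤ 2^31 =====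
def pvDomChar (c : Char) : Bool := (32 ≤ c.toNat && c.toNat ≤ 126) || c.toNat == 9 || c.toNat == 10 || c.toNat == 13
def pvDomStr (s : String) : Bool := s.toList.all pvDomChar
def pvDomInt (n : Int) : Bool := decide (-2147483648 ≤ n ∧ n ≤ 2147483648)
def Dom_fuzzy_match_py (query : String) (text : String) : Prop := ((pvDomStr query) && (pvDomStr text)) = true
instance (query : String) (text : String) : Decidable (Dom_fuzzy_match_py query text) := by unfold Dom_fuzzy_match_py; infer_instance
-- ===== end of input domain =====

-- B iterates the QUERY and jumps the cursor with find(ch, pos) instead of A's scan over every text character; same return value, idiomatic restructuring.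

-- ===== PORT A =====
-- literal port of A: fold over enumerate(t) with state (positions, qi)
def fuzzy_match_py (query : String) (text : String) : Option (List Int) :=
  let qL : List Char := (PySem.Str.lower query).toList
  let tL : List Char := (PySem.Str.lower text).toList
  let st : List Int × Nat :=
    (PySem.List.enumerate tL 0).foldl
      (fun (st : List Int × Nat) (p : Int × Char) =>
        if st.2 < qL.length ∧ qL[st.2]? = some p.2 then (st.1 ++ [p.1], st.2 + 1) else st)
      ([], 0)
  if st.2 = qL.length then some st.1 else none

-- ===== PORT B =====
-- B's loop over the query characters with an early return: structural recursion on the query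
def fuzzyAltGo (tL : List Char) : List Char → Int → List Int → Option (List Int)
  | [], _, acc => some acc
  | ch :: rest, pos, acc =>
    let idx := PySem.Chars.findFrom tL [ch] pos none   -- t.find(ch, pos)
    if idx = -1 then none
    else fuzzyAltGo tL rest (idx + 1) (acc ++ [idx])

def fuzzy_match_py_alt (query : String) (text : String) : Option (List Int) :=
  let qL : List Char := (PySem.Str.lower query).toList
  let tL : List Char := (PySem.Str.lower text).toList
  fuzzyAltGo tL qL 0 []

-- ===== PRECONDITION & SPEC =====
def Spec_fuzzy_match_py (query : String) (text : String) (out : Option (List Int)) : Prop := out = fuzzy_match_py_alt query text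
instance (query : String) (text : String) (out : Option (List Int)) : Decidable (Spec_fuzzy_match_py query text out) := by unfold Spec_fuzzy_match_py; infer_instance

-- ===== CLAIM (what is proved, stated in full; the proofs are below) =====
def Claim_equal_fuzzy_match_py : Prop := ∀ (query : String) (text : String), Dom_fuzzy_match_py query text → Spec_fuzzy_match_py query text (fuzzy_match_py query text)

-- ===== LEMMAS AND PROOFS =====

-- canonical greedy scan (A's loop as structural recursion)
def aScan (qL : List Char) : List Char → Int → Nat → List Int × Nat
  | [], _, qi => ([], qi)
  | c :: ts, s, qi =>
    if qi < qL.length ∧ qL[qi]? = some c then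
      let r := aScan qL ts (s + 1) (qi + 1)
      (s :: r.1, r.2)
    else aScan qL ts (s + 1) qi

-- first index of ch in a char list (relative), structural
def ffa (ch : Char) : List Char → Option Nat
  | [] => none
  | c :: cs => if c = ch then some 0 else (ffa ch cs).map (· + 1)

lemma ffa_none_iff (ch : Char) (u : List Char) : ffa ch u = none ↔ ch ∉ u := by
  induction u with
  | nil => simp [ffa]
  | cons c cs ih =>
    by_cases h : c = ch
    · simp [ffa, h]
    · simp only [ffa, if_neg h, Option.map_eq_none_iff, ih, List.mem_cons]
      constructor
      · intro hn hor
        cases hor with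
        | inl he => exact h he.symm
        | inr hm => exact hn hm
      · intro hn hm
        exact hn (Or.inr hm)

lemma ffa_some (ch : Char) (u : List Char) (i : Nat) (h : ffa ch u = some i) :
    u[i]? = some ch ∧ ∀ j < i, u[j]? ≠ some ch := by
  induction u generalizing i with
  | nil => simp [ffa] at h
  | cons c cs ih =>
    by_cases hc : c = ch
    · simp [ffa, hc] at h
      subst h; simp [hc]
    · simp [ffa, hc, Option.map_eq_some_iff] at h
      obtain ⟨k, hk, rfl⟩ := h
      obtain ⟨h1, h2⟩ := ih k hk
      refine ⟨by simpa using h1, ?_⟩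
      intro j hj
      cases j with
      | zero => simp [hc]
      | succ j => simpa using h2 j (by omega)

lemma singleton_prefix_iff (ch : Char) (v : List Char) : [ch] <+: v ↔ v.head? = some ch := by
  cases v with
  | nil => simp
  | cons c cs => simp [List.cons_prefix_cons, eq_comm]

lemma singleton_prefix_drop_iff (ch : Char) (u : List Char) (j : Nat) :
    [ch] <+: u.drop j ↔ u[j]? = some ch := by
  rw [singleton_prefix_iff, List.head?_drop]

lemma find_singleton (u : List Char) (ch : Char) :
    PySem.Chars.find u [ch] =
      (match ffa ch u with | none => (-1 : Int) | some i => (i : Int)) := by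
  cases hf : ffa ch u with
  | none =>
    have : ¬ [ch] <:+: u := by
      intro hin
      have : ch ∈ u := by
        obtain ⟨s, t, hst⟩ := hin
        simp [← hst]
      exact (ffa_none_iff ch u).1 hf this
    simpa using (PySem.Chars.find_eq_neg_one_iff u [ch]).2 this
  | some i =>
    obtain ⟨h1, h2⟩ := ffa_some ch u i hf
    have hmem : ch ∈ u := by
      have := List.getElem?_eq_some_iff.1 h1
      obtain ⟨hlt, he⟩ := this
      exact he ▸ List.getElem_mem hlt
    have hin : [ch] <:+: u := by
      obtain ⟨j, hj1, hj2⟩ := List.getElem_of_mem hmem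
      exact ((singleton_prefix_drop_iff ch u j).2 (by simp [List.getElem?_eq_some_iff]; exact ⟨hj1, hj2⟩)).isInfix.trans (List.drop_suffix j u).isInfix  -- prefix of drop is infix of u
    have hnn : 0 ≤ PySem.Chars.find u [ch] := (PySem.Chars.find_nonneg_iff u [ch]).2 hin
    obtain ⟨hp, hmin⟩ := PySem.Chars.find_spec (s := u) (sub := [ch]) hnn
    have hN := (singleton_prefix_drop_iff ch u _).1 hp
    -- find.toNat = i by antisymmetry
    have hge : i ≤ (PySem.Chars.find u [ch]).toNat := by
      by_contra hlt
      exact h2 _ (by omega) hN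
    have hle : (PySem.Chars.find u [ch]).toNat ≤ i := by
      by_contra hlt
      exact hmin i (by omega) ((singleton_prefix_drop_iff ch u i).2 h1)
    have : (PySem.Chars.find u [ch]).toNat = i := le_antisymm hle hge
    simp only []
    omega

lemma aScan_len (qL : List Char) (u : List Char) (s : Int) :
    aScan qL u s qL.length = ([], qL.length) := by
  induction u generalizing s with
  | nil => simp [aScan]
  | cons c ts ih => simp [aScan, ih]

set_option maxRecDepth 8000 in
lemma core (qL tL : List Char) (u : List Char) :
    ∀ (pos qi : Nat) (acc : List Int), u = tL.drop pos → pos ≤ tL.length → qi ≤ qL.length →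
    fuzzyAltGo tL (qL.drop qi) ((pos : Nat) : Int) acc =
      (if (aScan qL u (pos : Int) qi).2 = qL.length
       then some (acc ++ (aScan qL u (pos : Int) qi).1) else none) := by
  induction u with
  | nil =>
    intro pos qi acc hu hpos hqi
    by_cases h : qi = qL.length
    · subst h
      simp [aScan, List.drop_length, fuzzyAltGo]
    · have hlt : qi < qL.length := by omega
      have : qL.drop qi = qL[qi] :: qL.drop (qi + 1) := List.drop_eq_getElem_cons hlt
      rw [this]
      simp only [fuzzyAltGo]
      have hfind : PySem.Chars.findFrom tL [qL[qi]] ((pos : Nat) : Int) none = -1 := by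
        rw [PySem.Chars.findFrom_natCast tL [qL[qi]] pos hpos, ← hu]
        simp [find_singleton, ffa]
      rw [hfind]
      rw [if_pos rfl]
      rw [show aScan qL [] ((pos : Nat) : Int) qi = ([], qi) from rfl]
      simp [h]
  | cons c ts ih =>
    intro pos qi acc hu hpos hqi
    have hts : ts = tL.drop (pos + 1) := by
      rw [← List.tail_drop, ← hu]
      rfl
    have hpos1 : pos + 1 ≤ tL.length := by
      by_contra hge
      push Not at hge
      have h0 : tL.drop pos = [] := List.drop_eq_nil_of_le (by omega)
      have := hu.symm
      rw [h0] at this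
      simp at this
    by_cases h : qi = qL.length
    · subst h
      simp [List.drop_length, fuzzyAltGo, aScan_len]
    · have hlt : qi < qL.length := by omega
      have hdq : qL.drop qi = qL[qi] :: qL.drop (qi + 1) := List.drop_eq_getElem_cons hlt
      rw [hdq]
      simp only [fuzzyAltGo]
      rw [PySem.Chars.findFrom_natCast tL [qL[qi]] pos hpos, ← hu]
      by_cases hc : c = qL[qi]
      · -- match: find returns relative 0, absolute pos
        have hfind : PySem.Chars.find (c :: ts) [qL[qi]] = 0 := by
          simp [find_singleton, ffa, hc]
        rw [hfind]
        rw [if_neg (by norm_num : ¬ ((0 : Int) = -1))]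
        rw [show ((pos : Nat) : Int) + 0 = ((pos : Nat) : Int) by ring]
        rw [if_neg (by omega : ¬ (((pos : Nat) : Int) = -1))]
        simp only [aScan]
        have hcond : qi < qL.length ∧ qL[qi]? = some c := by
          exact ⟨hlt, by simp [hc, hlt]⟩
        rw [if_pos hcond]
        have hIH := ih (pos + 1) (qi + 1) (acc ++ [((pos : Nat) : Int)]) hts hpos1 (by omega)
        push_cast at hIH ⊢
        rw [hIH]
        by_cases hr : (aScan qL ts ((pos : Int) + 1) (qi + 1)).2 = qL.length <;> simp [hr]
      · -- no match at c: skipping one text char changes neither side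
        have hfa : ffa qL[qi] (c :: ts) = (ffa qL[qi] ts).map (· + 1) := by
          simp [ffa, hc]
        have hIH := ih (pos + 1) qi acc hts hpos1 hqi
        rw [hdq] at hIH
        simp only [fuzzyAltGo] at hIH
        rw [PySem.Chars.findFrom_natCast tL [qL[qi]] (pos + 1) hpos1, ← hts] at hIH
        have hstep : aScan qL (c :: ts) (pos : Int) qi = aScan qL ts ((pos : Int) + 1) qi := by
          simp only [aScan]
          rw [if_neg]
          intro ⟨_, hg⟩
          have : qL[qi] = c := by
            have := List.getElem?_eq_some_iff.1 hg
            exact this.2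
          exact hc this.symm
        rw [hstep]
        cases hx : ffa qL[qi] ts with
        | none =>
          have h1 : PySem.Chars.find (c :: ts) [qL[qi]] = -1 := by
            simp [find_singleton, hfa, hx]
          have h2 : PySem.Chars.find ts [qL[qi]] = -1 := by
            simp [find_singleton, hx]
          rw [h1]; rw [h2] at hIH
          rw [if_pos rfl]; rw [if_pos rfl] at hIH
          rw [if_pos rfl]; rw [if_pos rfl] at hIH
          exact hIH
        | some k =>
          have h1 : PySem.Chars.find (c :: ts) [qL[qi]] = ((k : Int) + 1) := by
            simp only [find_singleton, hfa, hx, Option.map_some]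
            push_cast; ring
          have h2 : PySem.Chars.find ts [qL[qi]] = (k : Int) := by
            simp [find_singleton, hx]
          rw [h1]; rw [h2] at hIH
          rw [if_neg (by omega : ¬ ((k : Int) + 1 = -1))]
          rw [if_neg (by omega : ¬ ((k : Int) = -1))] at hIH
          rw [if_neg (by omega : ¬ (((pos : Nat) : Int) + ((k : Int) + 1) = -1))]
          rw [if_neg (by omega : ¬ (((pos + 1 : Nat) : Int) + (k : Int) = -1))] at hIH
          rw [show (((pos : Nat) : Int) + ((k:Int)+1) + 1) = (((pos+1 : Nat) : Int) + (k:Int) + 1) by push_cast; ring,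
              show (((pos : Nat) : Int) + ((k:Int)+1)) = (((pos+1 : Nat) : Int) + (k:Int)) by push_cast; ring]
          exact hIH

lemma foldA (qL : List Char) (u : List Char) :
    ∀ (s : Int) (acc : List Int) (qi : Nat),
    (PySem.List.enumerate u s).foldl
      (fun (st : List Int × Nat) (p : Int × Char) =>
        if st.2 < qL.length ∧ qL[st.2]? = some p.2 then (st.1 ++ [p.1], st.2 + 1) else st)
      (acc, qi)
    = (acc ++ (aScan qL u s qi).1, (aScan qL u s qi).2) := by
  induction u with
  | nil => intro s acc qi; simp [PySem.List.enumerate_nil, aScan]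
  | cons c ts ih =>
    intro s acc qi
    rw [PySem.List.enumerate_cons]
    simp only [List.foldl_cons]
    by_cases h : qi < qL.length ∧ qL[qi]? = some c
    · rw [if_pos h, ih]
      have hce : qL[qi] = c := (List.getElem?_eq_some_iff.1 h.2).2
      simp [aScan, h, hce]
    · rw [if_neg h, ih]
      simp [aScan, h]

-- ===== VERDICT (by name: the statement is the Claim_ definition above) =====
theorem fuzzy_match_py_spec : Claim_equal_fuzzy_match_py := by
  intro query text _
  unfold Spec_fuzzy_match_py fuzzy_match_py fuzzy_match_py_alt
  simp only []
  set qL := (PySem.Str.lower query).toList with hq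
  set tL := (PySem.Str.lower text).toList with ht
  rw [foldA qL tL 0 [] 0]
  have := core qL tL tL 0 0 [] (by simp) (by omega) (by omega)
  simp only [List.drop_zero, Nat.cast_zero] at this
  rw [← this]
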